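-- pv_equiv track=rewrite | github.com/AndyShyklo/Poeas__andys103_jadyl3 | app/helper.py | get_singletons
-- ===== SOURCE A (Python) =====
-- def get_singletons(class_list):
--     courses_to_num_of_sections = {}
--     for course in class_list:
--         if courses_to_num_of_sections.get(course["CourseCode"]):
--             courses_to_num_of_sections[course["CourseCode"]] +=1
--         else:
--             courses_to_num_of_sections[course["CourseCode"]] = 1
--     return[x for x in courses_to_num_of_sections if courses_to_num_of_sections[x] == 1]
-- ===== SOURCE B (Python) =====
-- def get_singletons(class_list):
--     codes = [course["CourseCode"] for course in class_list]
--     return [c for i, c in enumerate(codes)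
--             if c not in codes[:i] and c not in codes[i + 1:]]
-- ===== Notes on version B (the rewrite author's own statement) =====
-- stated objective: alternative
-- what changed: Removes the counting dictionary entirely: B extracts the code list once and keeps a code iff it occurs nowhere else in the list (no occurrence before position i and none after), a positional no-duplicate scan instead of count-then-filter.
import Mathlib
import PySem

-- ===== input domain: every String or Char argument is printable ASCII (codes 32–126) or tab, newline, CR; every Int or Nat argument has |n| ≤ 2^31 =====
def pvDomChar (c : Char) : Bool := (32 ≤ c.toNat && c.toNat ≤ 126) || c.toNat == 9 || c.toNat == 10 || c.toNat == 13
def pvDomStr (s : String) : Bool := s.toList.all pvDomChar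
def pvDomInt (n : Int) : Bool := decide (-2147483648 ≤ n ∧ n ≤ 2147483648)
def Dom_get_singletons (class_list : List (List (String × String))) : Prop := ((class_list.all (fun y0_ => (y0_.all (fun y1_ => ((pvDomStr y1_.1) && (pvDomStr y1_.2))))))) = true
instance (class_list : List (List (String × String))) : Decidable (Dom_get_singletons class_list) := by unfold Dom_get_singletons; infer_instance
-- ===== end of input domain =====

-- ===== PORT A =====
-- B replaces A's count-dict-then-filter by a positional no-other-occurrence scan (alternative
-- decomposition, not faster). Return value only.
-- course["CourseCode"]: first-match lookup on the association list (KeyError = none, excluded by Pre_).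
def pvCode (course : List (String × String)) : String :=
  ((PySem.Dict.mk course).get? "CourseCode").getD ""

-- the courses_to_num_of_sections dict after A's counting loop
def aCount (class_list : List (List (String × String))) : PySem.Dict String Int :=
  class_list.foldl (fun d course =>
    let code := pvCode course
    if PySem.Dict.getD d code 0 ≠ 0 then
      PySem.Dict.insert d code (PySem.Dict.getD d code 0 + 1)
    else
      PySem.Dict.insert d code 1) PySem.Dict.empty

def get_singletons (class_list : List (List (String × String))) : List String :=
  (PySem.Dict.keys (aCount class_list)).filter
    (fun x => PySem.Dict.getD (aCount class_list) x 0 == 1)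

-- ===== PORT B =====
-- codes = [course["CourseCode"] for course in class_list];
-- keep c at index i iff c not in codes[:i] and c not in codes[i+1:]
def get_singletons_alt (class_list : List (List (String × String))) : List String :=
  let codes := class_list.map pvCode
  ((PySem.List.enumerate codes 0).filter (fun p =>
      !(PySem.List.slice codes none (some p.1)).contains p.2 &&
      !(PySem.List.slice codes (some (p.1 + 1)) none).contains p.2)).map (·.2)

-- ===== PRECONDITION & SPEC =====
-- Pre_ excludes exactly the inputs where some course lacks the "CourseCode" key, on which the
-- Python A (and B) raise KeyError.
def Pre_get_singletons (class_list : List (List (String × String))) : Prop :=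
  class_list.all (fun course => (PySem.Dict.mk course).contains "CourseCode") = true
instance (class_list : List (List (String × String))) : Decidable (Pre_get_singletons class_list) := by unfold Pre_get_singletons; infer_instance

def pvWitness_get_singletons : (List (List (String × String))) :=
  [[("CourseCode", "CS101")], [("CourseCode", "CS102")], [("CourseCode", "CS101")]]

def Spec_get_singletons (class_list : List (List (String × String))) (out : List String) : Prop := out = get_singletons_alt class_list
instance (class_list : List (List (String × String))) (out : List String) : Decidable (Spec_get_singletons class_list out) := by unfold Spec_get_singletons; infer_instance

-- ===== CLAIM (what is proved, stated in full; the proofs are below) =====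
def Claim_equal_get_singletons : Prop := ∀ (class_list : List (List (String × String))), Dom_get_singletons class_list → Pre_get_singletons class_list → Spec_get_singletons class_list (get_singletons class_list)

-- ===== LEMMAS AND PROOFS =====

theorem aStep_eq (d : PySem.Dict String Int) (course : List (String × String)) :
    (let code := pvCode course;
     if PySem.Dict.getD d code 0 ≠ 0 then
       PySem.Dict.insert d code (PySem.Dict.getD d code 0 + 1)
     else PySem.Dict.insert d code 1) =
    PySem.Dict.insert d (pvCode course) (PySem.Dict.getD d (pvCode course) 0 + 1) := by
  by_cases h : PySem.Dict.getD d (pvCode course) 0 = 0 <;> simp [h]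

theorem a_dict_eq (class_list : List (List (String × String))) :
    aCount class_list = PySem.Dict.counter (class_list.map pvCode) := by
  unfold aCount
  rw [← PySem.Dict.foldl_insert_getD_add_one_eq_counter, List.foldl_map]
  congr 1
  funext d course
  exact aStep_eq d course

-- B's per-index condition is "this code occurs exactly once in codes"
theorem b_cond_eq (codes : List String) (k : Nat) (h : k < codes.length) :
    ((!(PySem.List.slice codes none (some (k : Int))).contains codes[k] &&
      !(PySem.List.slice codes (some ((k : Int) + 1)) none).contains codes[k])
     = (codes.count codes[k] == 1)) := by
  have h1 : PySem.List.slice codes none (some (k : Int)) = codes.take k :=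
    PySem.List.slice_to_natCast codes k
  have h2 : PySem.List.slice codes (some ((k : Int) + 1)) none = codes.drop (k + 1) := by
    have : ((k : Int) + 1) = ((k + 1 : Nat) : Int) := by push_cast; ring
    rw [this, PySem.List.slice_from_natCast]
  have hsplit : codes = codes.take k ++ codes[k] :: codes.drop (k + 1) := by
    conv_lhs => rw [← List.take_append_drop k codes]
    congr 1
    exact List.drop_eq_getElem_cons h
  have hcnt : ∀ c, codes.count c
      = (codes.take k).count c + (if codes[k] = c then 1 else 0)
        + (codes.drop (k + 1)).count c := by
    intro c
    conv_lhs => rw [hsplit]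
    rw [List.count_append, List.count_cons]
    simp only [beq_iff_eq]
    split_ifs with h' <;> omega
  have hc := hcnt codes[k]
  rw [if_pos rfl] at hc
  rw [h1, h2, Bool.eq_iff_iff]
  simp only [Bool.and_eq_true, Bool.not_eq_true', List.contains_eq_mem,
    decide_eq_false_iff_not, beq_iff_eq, ← List.count_eq_zero]
  omega

-- filtering the first-occurrence dedup by a predicate that only holds on count-1 elements
-- equals filtering the list itself
theorem filter_ofList_eq (l : List String) (p : String → Bool)
    (h : ∀ x ∈ l, p x = true → l.count x = 1) :
    (PySem.Set.ofList l).filter p = l.filter p := by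
  induction l using List.reverseRecOn with
  | nil => simp [PySem.Set.ofList]
  | append_singleton l a ih =>
    rw [PySem.Set.ofList_append_singleton]
    by_cases ha : a ∈ l
    · have hpa : p a = false := by
        by_contra hf
        have hc := h a (by simp) (by simpa using hf)
        have h2 : 1 ≤ l.count a := List.one_le_count_iff.mpr ha
        rw [List.count_append] at hc
        simp at hc
        omega
      rw [PySem.Set.add_of_mem (by rw [PySem.Set.mem_ofList]; exact ha)]
      rw [ih (fun x hx hpx => by
        have h1 := h x (by simp [hx]) hpx
        have h2 : 1 ≤ l.count x := List.one_le_count_iff.mpr hx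
        rw [List.count_append] at h1
        omega)]
      simp [List.filter_append, hpa]
    · rw [PySem.Set.add_of_not_mem (by rw [PySem.Set.mem_ofList]; exact ha)]
      rw [List.filter_append, List.filter_append,
        ih (fun x hx hpx => by
          have h1 := h x (by simp [hx]) hpx
          have hxa : x ≠ a := fun e => ha (e ▸ hx)
          rw [List.count_append] at h1
          simpa [Ne.symm hxa] using h1)]

-- B's output is codes filtered to count-1 elements
theorem b_eq_filter (class_list : List (List (String × String))) :
    get_singletons_alt class_list
      = (class_list.map pvCode).filter (fun c => (class_list.map pvCode).count c == 1) := by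
  rw [show get_singletons_alt class_list
      = ((PySem.List.enumerate (class_list.map pvCode) 0).filter (fun p =>
          !(PySem.List.slice (class_list.map pvCode) none (some p.1)).contains p.2 &&
          !(PySem.List.slice (class_list.map pvCode) (some (p.1 + 1)) none).contains p.2)).map (·.2)
      from rfl]
  generalize class_list.map pvCode = codes
  have hfc : (PySem.List.enumerate codes 0).filter (fun p =>
        !(PySem.List.slice codes none (some p.1)).contains p.2 &&
        !(PySem.List.slice codes (some (p.1 + 1)) none).contains p.2)
      = (PySem.List.enumerate codes 0).filter (fun p => codes.count p.2 == 1) := by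
    apply List.filter_congr
    intro p hp
    rw [PySem.List.mem_enumerate_iff] at hp
    obtain ⟨k, hk, rfl⟩ := hp
    simpa using b_cond_eq codes k hk
  rw [hfc]
  have : (fun p : Int × String => codes.count p.2 == 1) = (fun c => codes.count c == 1) ∘ (·.2) := rfl
  rw [this, ← List.filter_map, PySem.List.map_snd_enumerate]

-- ===== VERDICT (by name: the statement is the Claim_ definition above) =====
theorem get_singletons_spec : Claim_equal_get_singletons := by
  intro class_list _ _
  unfold Spec_get_singletons get_singletons
  rw [a_dict_eq, b_eq_filter]
  simp only [PySem.Dict.keys_counter, PySem.Dict.getD_counter]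
  rw [filter_ofList_eq _ _ (fun x _ hp => by simpa using hp)]
  apply List.filter_congr
  intro x _
  simp
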